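-- pv_equiv track=rewrite | github.com/bw4sz/DeepMeerkat | DeepMeerkat/VideoClip.py | combine_clips
-- ===== SOURCE A (Python) =====
-- def combine_clips(clip_range,n=30):
--
--     #perform iteratively until no more concatanations
--     flat_list = [item for sublist in clip_range for item in sublist]
--     b = [abs(i - j) > n for i, j in zip(flat_list[:-1], flat_list[1:])]
--     m = [i + 1 for i, j in enumerate(b) if j is True]
--     m = [0] + m + [len(flat_list)]
--     new_groups = [flat_list[i: j] for i, j in zip(m[:-1], m[1:])]
--
--     rule1=[[min(x),max(x)] for x in new_groups]
--
--     return rule1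
-- ===== SOURCE B (Python) =====
-- def combine_clips(clip_range, n=30):
--     # single pass with running [lo, hi] per group; no intermediate mask/index/slice lists
--     out = []
--     lo = hi = prev = None
--     for sublist in clip_range:
--         for x in sublist:
--             if prev is None:
--                 lo = hi = x
--             elif abs(x - prev) > n:
--                 out.append([lo, hi])
--                 lo = hi = x
--             else:
--                 lo = min(lo, x)
--                 hi = max(hi, x)
--             prev = x
--     if prev is not None:
--         out.append([lo, hi])
--     return out
-- ===== Notes on version B (the rewrite author's own statement) =====
-- stated objective: simpler
-- what changed: Replaced A's five-stage mask/enumerate/index/slice pipeline (plus min/max over each materialised group) by a single accumulator pass over the flattened values that keeps a running [lo, hi] for the current gap-group and emits it when the gap to the previous value exceeds n.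
import Mathlib
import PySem

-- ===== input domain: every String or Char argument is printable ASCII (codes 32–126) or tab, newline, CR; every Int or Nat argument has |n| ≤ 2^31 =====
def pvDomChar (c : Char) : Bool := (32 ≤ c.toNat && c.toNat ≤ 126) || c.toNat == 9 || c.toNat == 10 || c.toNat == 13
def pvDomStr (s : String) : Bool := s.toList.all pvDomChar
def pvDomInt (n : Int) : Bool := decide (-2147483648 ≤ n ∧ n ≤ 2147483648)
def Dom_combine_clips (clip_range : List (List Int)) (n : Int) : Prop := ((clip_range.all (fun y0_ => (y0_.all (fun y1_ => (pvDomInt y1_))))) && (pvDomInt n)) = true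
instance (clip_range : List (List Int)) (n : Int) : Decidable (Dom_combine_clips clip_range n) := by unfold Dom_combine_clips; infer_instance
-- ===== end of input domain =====

-- B replaces A's mask/index/slice pipeline by one accumulator pass keeping a running [lo,hi]
-- per gap-group (objective: simpler); equivalence is about the return value only.

-- ===== PORT A =====
def combine_clips (clip_range : List (List Int)) (n : Int) : List (List Int) :=
  let flat_list := clip_range.flatMap id
  let b := ((PySem.List.slice flat_list none (some (-1))).zip (PySem.List.slice flat_list (some 1) none)).map
      (fun p => decide (|p.1 - p.2| > n))
  let m0 := (PySem.List.enumerate b 0).filterMap (fun p => if p.2 then some (p.1 + 1) else none)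
  let m : List Int := 0 :: m0 ++ [(flat_list.length : Int)]
  let new_groups := ((PySem.List.slice m none (some (-1))).zip (PySem.List.slice m (some 1) none)).map
      (fun p => PySem.List.slice flat_list (some p.1) (some p.2))
  new_groups.map (fun x =>
    [(PySem.List.min? x (fun y => y)).getD 0, (PySem.List.max? x (fun y => y)).getD 0])

-- ===== PORT B =====
def pvStepB (n : Int) (st : List (List Int) × Option (Int × Int × Int)) (x : Int) :
    List (List Int) × Option (Int × Int × Int) :=
  match st.2 with
  | none => (st.1, some (x, x, x))
  | some (lo, hi, prev) =>
      if |x - prev| > n then (st.1 ++ [[lo, hi]], some (x, x, x))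
      else (st.1, some (min lo x, max hi x, x))

def combine_clips_alt (clip_range : List (List Int)) (n : Int) : List (List Int) :=
  let st := clip_range.foldl (fun st sub => sub.foldl (pvStepB n) st) ([], none)
  match st.2 with
  | none => st.1
  | some (lo, hi, _) => st.1 ++ [[lo, hi]]

-- ===== PRECONDITION & SPEC =====
-- Pre_ excludes inputs whose flattened list is empty: there A raises ValueError (min of empty group).
def Pre_combine_clips (clip_range : List (List Int)) (n : Int) : Prop :=
  clip_range.flatten ≠ []
instance (clip_range : List (List Int)) (n : Int) : Decidable (Pre_combine_clips clip_range n) := by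
  unfold Pre_combine_clips; infer_instance
def pvWitness_combine_clips : List (List Int) × Int := ([[1, 2], [50]], 5)

def Spec_combine_clips (clip_range : List (List Int)) (n : Int) (out : List (List Int)) : Prop :=
  out = combine_clips_alt clip_range n
instance (clip_range : List (List Int)) (n : Int) (out : List (List Int)) : Decidable (Spec_combine_clips clip_range n out) := by unfold Spec_combine_clips; infer_instance

-- ===== CLAIM (what is proved, stated in full; the proofs are below) =====
def Claim_equal_combine_clips : Prop := ∀ (clip_range : List (List Int)) (n : Int), Dom_combine_clips clip_range n → Pre_combine_clips clip_range n → Spec_combine_clips clip_range n (combine_clips clip_range n)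


-- ===== LEMMAS AND PROOFS =====

-- Reference grouping: split the list at adjacent gaps > n, current group accumulated left to right.
def pvSplit (n : Int) (prev : Int) (cur : List Int) : List Int → List (List Int)
  | [] => [cur]
  | x :: xs => if |x - prev| > n then cur :: pvSplit n x [x] xs else pvSplit n x (cur ++ [x]) xs

def pvMM (g : List Int) : List Int :=
  [(PySem.List.min? g (fun y => y)).getD 0, (PySem.List.max? g (fun y => y)).getD 0]

-- B-side tail recursion with running extrema.
def pvGrp (n : Int) (lo hi prev : Int) : List Int → List (List Int)
  | [] => [[lo, hi]]
  | x :: xs => if |x - prev| > n then [lo, hi] :: pvGrp n x x x xs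
               else pvGrp n (min lo x) (max hi x) x xs

theorem pvStepB_fold (n : Int) (xs : List Int) : ∀ (out : List (List Int)) (lo hi prev : Int),
    (match (xs.foldl (pvStepB n) (out, some (lo, hi, prev))).2 with
      | none => (xs.foldl (pvStepB n) (out, some (lo, hi, prev))).1
      | some (l, h, _) => (xs.foldl (pvStepB n) (out, some (lo, hi, prev))).1 ++ [[l, h]])
    = out ++ pvGrp n lo hi prev xs := by
  induction xs with
  | nil => intro out lo hi prev; simp [pvGrp]
  | cons x xs ih =>
      intro out lo hi prev
      simp only [List.foldl_cons, pvStepB, pvGrp]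
      by_cases h : |x - prev| > n
      · simp [h, ih]
      · simp [h, ih]

theorem pvGrp_eq_map (n : Int) (xs : List Int) : ∀ (cur : List Int) (c : Int) (t : List Int)
    (prev : Int), cur = c :: t →
    pvGrp n (t.foldl min c) (t.foldl max c) prev xs = (pvSplit n prev cur xs).map pvMM := by
  induction xs with
  | nil =>
      intro cur c t prev hc
      subst hc
      simp [pvGrp, pvSplit, pvMM, PySem.List.min?_id_cons, PySem.List.max?_id_cons]
  | cons x xs ih =>
      intro cur c t prev hc
      subst hc
      simp only [pvGrp, pvSplit]
      by_cases h : |x - prev| > n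
      · simp only [h, if_pos, List.map_cons]
        refine List.cons.injEq .. ▸ ?_
        exact ⟨by simp [pvMM, PySem.List.min?_id_cons, PySem.List.max?_id_cons],
               by simpa using ih [x] x [] x rfl⟩
      · simp only [h, if_neg, not_false_iff]
        have := ih (c :: t ++ [x]) c (t ++ [x]) x rfl
        simpa [List.foldl_append] using this

-- A-side helpers for the proof: named versions of the pipeline pieces.
def pvSpts (n : Int) (s : Int) : List Int → List Int
  | [] => []
  | [_] => []
  | x :: y :: rest => (if |x - y| > n then [s + 1] else []) ++ pvSpts n (s + 1) (y :: rest)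

def pvChop (flat : List Int) : Int → List Int → List (List Int)
  | _, [] => []
  | a, c :: r => PySem.List.slice flat (some a) (some c) :: pvChop flat c r

def pvGroupsA (n : Int) (flat : List Int) : List (List Int) :=
  let b := ((PySem.List.slice flat none (some (-1))).zip (PySem.List.slice flat (some 1) none)).map
      (fun p => decide (|p.1 - p.2| > n))
  let m0 := (PySem.List.enumerate b 0).filterMap (fun p => if p.2 then some (p.1 + 1) else none)
  let m : List Int := 0 :: m0 ++ [(flat.length : Int)]
  ((PySem.List.slice m none (some (-1))).zip (PySem.List.slice m (some 1) none)).map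
      (fun p => PySem.List.slice flat (some p.1) (some p.2))

theorem combine_clips_eq (cr : List (List Int)) (n : Int) :
    combine_clips cr n = (pvGroupsA n (cr.flatMap id)).map pvMM := rfl

theorem pvSpts_shift (n : Int) (flat : List Int) : ∀ (s : Int),
    pvSpts n s flat = (pvSpts n 0 flat).map (· + s) := by
  induction flat with
  | nil => intro s; simp [pvSpts]
  | cons x ys ih =>
      cases ys with
      | nil => intro s; simp [pvSpts]
      | cons y rest =>
          intro s
          rw [pvSpts, pvSpts, ih (s + 1), ih (0 + 1), List.map_append, List.map_map]
          congr 1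
          · by_cases h : |x - y| > n
            · simp [h]; ring
            · simp [h]
          · congr 1; funext z; simp; ring

theorem pvSpts_pos (n : Int) (flat : List Int) : ∀ (s : Int) (c : Int), c ∈ pvSpts n s flat → s + 1 ≤ c := by
  induction flat with
  | nil => intro s c hc; simp [pvSpts] at hc
  | cons x ys ih =>
      cases ys with
      | nil => intro s c hc; simp [pvSpts] at hc
      | cons y rest =>
          intro s c hc
          rw [pvSpts] at hc
          rcases List.mem_append.mp hc with h1 | h2
          · split at h1 <;> simp_all
          · have := ih (s + 1) c h2; omega

theorem pvEnumFilter_eq (n : Int) (flat : List Int) : ∀ (s : Int),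
    (PySem.List.enumerate ((flat.dropLast.zip flat.tail).map (fun p => decide (|p.1 - p.2| > n))) s).filterMap
        (fun p => if p.2 then some (p.1 + 1) else none)
    = pvSpts n s flat := by
  induction flat with
  | nil => intro s; simp [pvSpts, PySem.List.enumerate_nil]
  | cons x ys ih =>
      cases ys with
      | nil => intro s; simp [pvSpts, PySem.List.enumerate_nil]
      | cons y rest =>
          intro s
          have hd : (x :: y :: rest).dropLast = x :: (y :: rest).dropLast := by
            simp [List.dropLast]
          rw [pvSpts, hd]
          simp only [List.tail_cons, List.zip_cons_cons, List.map_cons,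
            PySem.List.enumerate_cons, List.filterMap_cons]
          have hih := ih (s + 1)
          simp only [List.tail_cons] at hih
          rw [hih]
          by_cases h : |x - y| > n <;> simp [h]

theorem pvChop_zip (flat : List Int) : ∀ (r : List Int) (a : Int),
    (((a :: r).dropLast.zip r).map (fun p => PySem.List.slice flat (some p.1) (some p.2)))
    = pvChop flat a r := by
  intro r
  induction r with
  | nil => intro a; simp [pvChop]
  | cons c r' ih =>
      intro a
      have hd : (a :: c :: r').dropLast = a :: (c :: r').dropLast := by
        simp [List.dropLast]
      rw [pvChop, hd, List.zip_cons_cons, List.map_cons, ih c]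

theorem pvSlice_succ (x a c : Int) (ys : List Int) (ha : 0 ≤ a) (hc : 0 ≤ c) :
    PySem.List.slice (x :: ys) (some (a + 1)) (some (c + 1)) = PySem.List.slice ys (some a) (some c) := by
  rw [PySem.List.slice_toNat _ (by omega) (by omega), PySem.List.slice_toNat _ ha hc]
  have h1 : (a + 1).toNat = a.toNat + 1 := by omega
  have h2 : (c + 1).toNat = c.toNat + 1 := by omega
  simp [h1, h2]

theorem pvChop_shift (n x : Int) (ys : List Int) : ∀ (r : List Int) (a : Int), 0 ≤ a →
    (∀ c ∈ r, 0 ≤ c) → pvChop (x :: ys) (a + 1) (r.map (· + 1)) = pvChop ys a r := by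
  intro r
  induction r with
  | nil => intro a _ _; simp [pvChop]
  | cons c r' ih =>
      intro a ha hr
      have hc : 0 ≤ c := hr c (by simp)
      rw [List.map_cons, pvChop, pvChop, pvSlice_succ x a c ys ha hc,
        ih c hc (fun d hd => hr d (by simp [hd]))]

theorem pvGroupsA_form (n : Int) (flat : List Int) :
    pvGroupsA n flat = pvChop flat 0 (pvSpts n 0 flat ++ [(flat.length : Int)]) := by
  unfold pvGroupsA
  simp only [PySem.List.slice_to_neg_one, PySem.List.slice_from_one, List.cons_append,
    List.tail_cons]
  rw [pvEnumFilter_eq, pvChop_zip]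

def pvConsFirst (x : Int) : List (List Int) → List (List Int)
  | [] => [[x]]
  | g :: gs => (x :: g) :: gs

theorem pvConsFirst_pvSplit (n x : Int) (xs : List Int) : ∀ (prev : Int) (cur : List Int),
    pvConsFirst x (pvSplit n prev cur xs) = pvSplit n prev (x :: cur) xs := by
  induction xs with
  | nil => intro prev cur; simp [pvSplit, pvConsFirst]
  | cons z zs ih =>
      intro prev cur
      rw [pvSplit, pvSplit]
      by_cases h : |z - prev| > n
      · simp [h, pvConsFirst]
      · simpa [h] using ih z (cur ++ [z])

theorem pvGroupsA_char (n : Int) (ys : List Int) : ∀ (x : Int),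
    pvGroupsA n (x :: ys) = pvSplit n x [x] ys := by
  induction ys with
  | nil =>
      intro x
      rw [pvGroupsA_form, pvSplit, pvSpts]
      simp only [List.nil_append, List.length_cons, List.length_nil, pvChop]
      rw [PySem.List.slice_toNat _ (by omega) (by omega)]
      simp
  | cons y rest ih =>
      intro x
      rw [pvGroupsA_form, pvSpts]
      simp only [zero_add]
      rw [pvSpts_shift n (y :: rest) 1]
      have hlen : ((x :: y :: rest).length : Int) = ((y :: rest).length : Int) + 1 := by
        push_cast [List.length_cons]; ring
      set r : List Int := pvSpts n 0 (y :: rest) ++ [((y :: rest).length : Int)] with hr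
      have hrpos : ∀ c ∈ r, 0 ≤ c := by
        intro c hc
        rcases List.mem_append.mp hc with h1 | h2
        · have := pvSpts_pos n (y :: rest) 0 c h1; omega
        · simp at h2; omega
      have hmap : (pvSpts n 0 (y :: rest)).map (· + 1) ++ [((x :: y :: rest).length : Int)]
          = r.map (· + 1) := by
        rw [hr, List.map_append, hlen]; simp
      have hconn : pvChop (y :: rest) 0 r = pvSplit n y [y] rest := by
        rw [← pvGroupsA_form, ih y]
      by_cases h : |x - y| > n
      · simp only [h, if_pos, List.cons_append, List.nil_append]
        rw [pvSplit, if_pos (abs_sub_comm x y ▸ h)]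
        show pvChop (x :: y :: rest) 0 (1 :: ((pvSpts n 0 (y :: rest)).map (· + 1) ++ [((x :: y :: rest).length : Int)])) = _
        rw [hmap, pvChop]
        have hs := pvChop_shift n x (y :: rest) r 0 le_rfl hrpos
        norm_num at hs
        rw [hs, hconn]
        congr 1
      · simp only [h, if_neg, not_false_iff, List.nil_append]
        rw [pvSplit, if_neg (fun hh => h (abs_sub_comm y x ▸ hh))]
        simp only [List.cons_append, List.nil_append]
        rw [← pvConsFirst_pvSplit, ← hconn]
        show pvChop (x :: y :: rest) 0 ((pvSpts n 0 (y :: rest)).map (· + 1) ++ [((x :: y :: rest).length : Int)]) = _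
        rw [hmap]
        obtain ⟨c, r', hrc⟩ : ∃ c r', r = c :: r' := by
          rw [hr]; cases pvSpts n 0 (y :: rest) <;> exact ⟨_, _, rfl⟩
        have hc : 0 ≤ c := hrpos c (by simp [hrc])
        have hr'pos : ∀ d ∈ r', 0 ≤ d := fun d hd => hrpos d (by simp [hrc, hd])
        rw [hrc, List.map_cons, pvChop, pvChop, pvConsFirst]
        have h01 : (c : Int) + 1 = c + 1 := rfl
        rw [pvChop_shift n x (y :: rest) r' c hc hr'pos]
        congr 1
        rw [PySem.List.slice_toNat _ (by omega) (by omega),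
          PySem.List.slice_toNat _ le_rfl hc]
        have h2 : (c + 1).toNat = c.toNat + 1 := by omega
        simp [h2]

theorem pvMain (n : Int) (flat : List Int) (x : Int) (xs : List Int) (h : flat = x :: xs) :
    (pvGroupsA n flat).map pvMM = pvGrp n x x x xs := by
  subst h
  rw [pvGroupsA_char]
  simpa using (pvGrp_eq_map n xs [x] x [] x rfl).symm

-- ===== VERDICT (by name: the statement is the Claim_ definition above) =====
theorem combine_clips_spec : Claim_equal_combine_clips := by
  intro cr n _ hpre
  unfold Spec_combine_clips
  unfold Pre_combine_clips at hpre
  obtain ⟨x, xs, hflat⟩ : ∃ x xs, cr.flatten = x :: xs := by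
    cases hf : cr.flatten with
    | nil => exact absurd hf hpre
    | cons a t => exact ⟨a, t, rfl⟩
  rw [combine_clips_eq, List.flatMap_id, pvMain n cr.flatten x xs hflat]
  show _ = combine_clips_alt cr n
  unfold combine_clips_alt
  rw [← List.foldl_flatten, hflat]
  simp only [List.foldl_cons, pvStepB]
  exact (pvStepB_fold n xs [] x x x).symm
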